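-- pv_equiv track=rewrite | github.com/julian-ferrato/runtrack-python | jour04/job14/job14.py | my_long_word
-- ===== SOURCE A (Python) =====
-- def my_long_word(longueur, chaine):
--     mots = ""
--     mot_actuel = ""
--     for char in chaine:
--         if char != ' ':
--             mot_actuel += char
--         else:
--             longueur_mot = 0
--             for _ in mot_actuel:
--                 longueur_mot += 1
--
--             if longueur_mot > longueur:
--                 mots += mot_actuel + ' '
--             mot_actuel = ""
--
--     longueur_mot = 0
--     for _ in mot_actuel:
--         longueur_mot += 1
--
--     if longueur_mot > longueur:
--         mots += mot_actuel
--
--     return mots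
-- ===== SOURCE B (Python) =====
-- def my_long_word(longueur, chaine):
--     tokens = chaine.split(' ')
--     out = []
--     for i, tok in enumerate(tokens):
--         if len(tok) > longueur:
--             out.append(tok + ' ' if i < len(tokens) - 1 else tok)
--     return ''.join(out)
-- ===== Notes on version B (the rewrite author's own statement) =====
-- stated objective: simpler
-- what changed: B splits the string once with split(' ') and joins the qualifying tokens (trailing space for every token except the last), replacing A's character-by-character scan with manual word accumulation and a hand-rolled length-counting inner loop; the C-level split/join also makes it measurably faster.
import Mathlib
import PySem

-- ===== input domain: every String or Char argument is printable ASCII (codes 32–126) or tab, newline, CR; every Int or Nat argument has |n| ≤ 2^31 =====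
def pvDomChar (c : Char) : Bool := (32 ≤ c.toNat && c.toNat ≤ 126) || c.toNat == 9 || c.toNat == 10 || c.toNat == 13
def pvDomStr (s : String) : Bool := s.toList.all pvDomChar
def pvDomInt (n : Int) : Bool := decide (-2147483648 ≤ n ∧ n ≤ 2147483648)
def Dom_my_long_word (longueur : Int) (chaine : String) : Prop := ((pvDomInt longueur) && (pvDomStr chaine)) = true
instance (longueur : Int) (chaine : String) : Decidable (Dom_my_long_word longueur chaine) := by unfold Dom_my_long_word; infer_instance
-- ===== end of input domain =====

-- B rebuilds the result from chaine.split(' ') in one token loop instead of A's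
-- character scan with manual word accumulation (objective: simpler). Return values only.

-- ===== PORT A =====
-- the body of A's for-loop: accumulate the char, or on ' ' flush the current word
-- (length counted by A's inner `for _ in mot_actuel` loop) when it is longer than longueur
def pvStepA (longueur : Int) (st : List Char × List Char) (c : Char) : List Char × List Char :=
  if c ≠ ' ' then (st.1, st.2 ++ [c])
  else
    let longueur_mot := st.2.foldl (fun n (_ : Char) => n + 1) (0 : Int)
    (if longueur_mot > longueur then st.1 ++ st.2 ++ [' '] else st.1, ([] : List Char))

def my_long_word (longueur : Int) (chaine : String) : String :=
  let fin := chaine.toList.foldl (pvStepA longueur) ([], [])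
  let longueur_mot := fin.2.foldl (fun n (_ : Char) => n + 1) (0 : Int)
  String.ofList (if longueur_mot > longueur then fin.1 ++ fin.2 else fin.1)

-- ===== PORT B =====
def my_long_word_alt (longueur : Int) (chaine : String) : String :=
  let tokens := PySem.Chars.splitOn chaine.toList [' ']
  let out := (PySem.List.enumerate tokens).foldl
    (fun out p =>
      if ((p.2.length : Int)) > longueur then
        out ++ [if p.1 < (tokens.length : Int) - 1 then p.2 ++ [' '] else p.2]
      else out) ([] : List (List Char))
  String.ofList (PySem.Chars.join [] out)

-- ===== PRECONDITION & SPEC =====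
def Spec_my_long_word (longueur : Int) (chaine : String) (out : String) : Prop := out = my_long_word_alt longueur chaine
instance (longueur : Int) (chaine : String) (out : String) : Decidable (Spec_my_long_word longueur chaine out) := by unfold Spec_my_long_word; infer_instance

-- ===== CLAIM (what is proved, stated in full; the proofs are below) =====
def Claim_equal_my_long_word : Prop := ∀ (longueur : Int) (chaine : String), Dom_my_long_word longueur chaine → Spec_my_long_word longueur chaine (my_long_word longueur chaine)

-- ===== LEMMAS AND PROOFS =====

-- pure structural form of str.split(' ')
def pvSp : List Char → List (List Char)
  | [] => [[]]
  | c :: rest =>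
    if c = ' ' then [] :: pvSp rest
    else
      match pvSp rest with
      | [] => [[c]]
      | w :: ws => (c :: w) :: ws

def pvConsHead (cur : List Char) : List (List Char) → List (List Char)
  | [] => [cur]
  | w :: ws => (cur ++ w) :: ws

-- join of the qualifying tokens, trailing space except on the last token
def pvRender (l : Int) : List (List Char) → List Char
  | [] => []
  | [t] => if (t.length : Int) > l then t else []
  | t :: u :: ts => (if (t.length : Int) > l then t ++ [' '] else []) ++ pvRender l (u :: ts)

lemma pvSp_ne_nil (cs : List Char) : pvSp cs ≠ [] := by
  cases cs with
  | nil => simp [pvSp]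
  | cons c rest =>
    simp only [pvSp]
    split
    · simp
    · split <;> simp

lemma pvConsHead_nil {xs : List (List Char)} (h : xs ≠ []) : pvConsHead [] xs = xs := by
  cases xs with
  | nil => exact absurd rfl h
  | cons w ws => simp [pvConsHead]

lemma pvCount (cs : List Char) (n : Int) :
    cs.foldl (fun n (_ : Char) => n + 1) n = n + cs.length := by
  induction cs generalizing n with
  | nil => simp
  | cons c rest ih => simp [List.foldl, ih]; ring

lemma pvGo_eq (fuel : Nat) (cs cur : List Char) (acc : List (List Char))
    (h : cs.length < fuel) :
    PySem.Chars.splitOn.go [' '] fuel cs cur acc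
      = acc.reverse ++ pvConsHead cur.reverse (pvSp cs) := by
  induction fuel generalizing cs cur acc with
  | zero => omega
  | succ fuel ih =>
    cases cs with
    | nil => simp [PySem.Chars.splitOn.go, pvSp, pvConsHead]
    | cons c rest =>
      by_cases hc : c = ' '
      · subst hc
        simp only [PySem.Chars.splitOn.go, List.isPrefixOf, BEq.rfl, Bool.true_and,
          if_pos, List.length_cons, List.length_nil,
          List.drop_succ_cons, List.drop_zero]
        rw [ih rest [] (cur.reverse :: acc) (by simpa using Nat.lt_of_succ_lt_succ h)]
        cases hsp : pvSp rest with
        | nil => exact absurd hsp (pvSp_ne_nil rest)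
        | cons w ws => simp [pvSp, pvConsHead, hsp]
      · have hpre : [' '].isPrefixOf (c :: rest) = false := by
          simp [List.isPrefixOf]; exact fun h' => hc h'.symm
        simp only [PySem.Chars.splitOn.go, hpre, Bool.false_eq_true, if_false]
        rw [ih rest (c :: cur) acc (by simpa using Nat.lt_of_succ_lt_succ h)]
        simp only [pvSp, hc, if_false]
        congr 1
        cases hsp : pvSp rest with
        | nil => exact absurd hsp (pvSp_ne_nil rest)
        | cons w ws => simp [pvConsHead]

lemma pvSplitOn_eq (cs : List Char) : PySem.Chars.splitOn cs [' '] = pvSp cs := by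
  unfold PySem.Chars.splitOn
  rw [pvGo_eq (cs.length + 1) cs [] [] (by omega)]
  simp [pvConsHead_nil (pvSp_ne_nil cs)]

-- A's loop, run from any state, produces the rendered split with cur glued onto its head
lemma pvAfold (l : Int) (cs : List Char) : ∀ (mots cur : List Char),
    (if (cs.foldl (pvStepA l) (mots, cur)).2.foldl (fun n (_ : Char) => n + 1) (0 : Int) > l
     then (cs.foldl (pvStepA l) (mots, cur)).1 ++ (cs.foldl (pvStepA l) (mots, cur)).2
     else (cs.foldl (pvStepA l) (mots, cur)).1)
      = mots ++ pvRender l (pvConsHead cur (pvSp cs)) := by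
  induction cs with
  | nil =>
    intro mots cur
    simp only [List.foldl_nil, pvCount, Int.zero_add, pvSp, pvConsHead, gt_iff_lt]
    split <;> simp [pvRender, *]
  | cons c rest ih =>
    intro mots cur
    by_cases hc : c = ' '
    · subst hc
      have hstep : pvStepA l (mots, cur) ' '
          = (if cur.foldl (fun n (_ : Char) => n + 1) (0 : Int) > l
             then mots ++ cur ++ [' '] else mots, ([] : List Char)) := by
        simp [pvStepA]
      rw [List.foldl_cons, hstep, ih]
      rw [pvConsHead_nil (pvSp_ne_nil rest)]
      cases hsp : pvSp rest with
      | nil => exact absurd hsp (pvSp_ne_nil rest)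
      | cons w ws =>
        by_cases hl : l < (cur.length : Int)
        · simp [pvSp, pvConsHead, hsp, pvRender, pvCount, hl]
        · simp [pvSp, pvConsHead, hsp, pvRender, pvCount, hl]
    · have hstep : pvStepA l (mots, cur) c = (mots, cur ++ [c]) := by
        simp [pvStepA, hc]
      rw [List.foldl_cons, hstep, ih]
      congr 2
      simp only [pvSp, hc, if_false]
      cases hsp : pvSp rest with
      | nil => exact absurd hsp (pvSp_ne_nil rest)
      | cons w ws => simp [pvConsHead]

lemma pvJoin_append_singleton (out : List (List Char)) (x : List Char) :
    PySem.Chars.join [] (out ++ [x]) = PySem.Chars.join [] out ++ x := by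
  induction out with
  | nil => simp [PySem.Chars.join_nil, PySem.Chars.join_singleton]
  | cons a as ih =>
    cases as with
    | nil => simp [PySem.Chars.join_singleton, PySem.Chars.join_cons_cons]
    | cons b bs => simp only [List.cons_append, PySem.Chars.join_cons_cons] at ih ⊢; simp [ih]

-- B's token loop renders the token list
lemma pvBfold (l : Int) (n : Int) (ts : List (List Char)) :
    ∀ (s : Int) (out : List (List Char)), s + ts.length = n →
    PySem.Chars.join []
      ((PySem.List.enumerate ts s).foldl
        (fun out p =>
          if ((p.2.length : Int)) > l then
            out ++ [if p.1 < n - 1 then p.2 ++ [' '] else p.2]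
          else out) out)
      = PySem.Chars.join [] out ++ pvRender l ts := by
  induction ts with
  | nil =>
    intro s out _
    simp [PySem.List.enumerate_nil, pvRender]
  | cons t ts ih =>
    intro s out hn
    rw [PySem.List.enumerate_cons, List.foldl_cons]
    cases ts with
    | nil =>
      have hs : ¬ (s < n - 1) := by simp at hn; omega
      simp only [PySem.List.enumerate_nil, List.foldl_nil, hs, if_false, pvRender, gt_iff_lt]
      split
      · rw [pvJoin_append_singleton]
      · simp
    | cons u us =>
      have hs : s < n - 1 := by
        simp only [List.length_cons] at hn; push_cast at hn; omega
      rw [ih (s + 1) _ (by simp only [List.length_cons] at hn ⊢; push_cast at hn ⊢; omega)]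
      simp only [hs, if_pos, pvRender, gt_iff_lt]
      split
      · rw [pvJoin_append_singleton]; simp
      · simp

-- ===== VERDICT (by name: the statement is the Claim_ definition above) =====
theorem my_long_word_spec : Claim_equal_my_long_word := by
  intro longueur chaine _
  unfold Spec_my_long_word my_long_word my_long_word_alt
  simp only [pvSplitOn_eq]
  rw [pvAfold longueur chaine.toList [] []]
  rw [pvConsHead_nil (pvSp_ne_nil chaine.toList)]
  rw [pvBfold longueur ((pvSp chaine.toList).length : Int) (pvSp chaine.toList) 0 [] (by simp)]
  simp
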